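-- pv_equiv track=rewrite | github.com/justinjo/advent-of-code | python/2025/advent_2025_day_06.py | part_two
-- ===== SOURCE A (Python) =====
-- def part_two(input_arr: list[str]) -> int:
--     operator_i = operand_i = total = 0
--     is_calculating = True
--     while is_calculating:
--         # get operator
--         while input_arr[-1][operator_i] == ' ':
--             operator_i += 1
--         operator = input_arr[-1][operator_i]
--         operator_i += 1
--
--         # get operands
--         operands = []
--         digit_found = True
--         while digit_found:
--             operand = 0
--             digit_found = False
--             for i in range(len(input_arr) - 1):
--                 if operand_i >= len(input_arr[0]):
--                     continue
--                 digit = input_arr[i][operand_i]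
--                 if digit == ' ':
--                     continue
--                 digit_found = True
--                 operand = int(input_arr[i][operand_i]) + operand * 10
--             if digit_found:
--                 operands.append(operand)
--             operand_i += 1
--
--         # calculate
--         if operator == '+':
--             total += sum(operands)
--         elif operator == '*':
--             product = 1
--             for x in operands:
--                 product *= x
--             total += product
--
--         # calc until end reached
--         is_calculating = operator_i < len(input_arr[0]) and operand_i < len(input_arr[-1])
--     return total
-- ===== SOURCE B (Python) =====
-- def part_two(input_arr: list[str]) -> int:
--     *rows, op_row = input_arr
--     width = len(input_arr[0])
--     operators = [ch for ch in op_row if ch != ' ']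
--     columns = [''.join(r[c] for r in rows if r[c] != ' ') for c in range(width)]
--     groups = []
--     cur = []
--     for col in columns:
--         if col:
--             cur.append(int(col))
--         else:
--             groups.append(cur)
--             cur = []
--     groups.append(cur)
--     total = 0
--     for op, operands in zip(operators, groups):
--         if op == '+':
--             total += sum(operands)
--         elif op == '*':
--             product = 1
--             for x in operands:
--                 product *= x
--             total += product
--     return total
-- ===== Notes on version B (the rewrite author's own statement) =====
-- stated objective: alternative
-- what changed: B is a staged pipeline with no cursors or flags: extract the operator list and the list of digit columns once, split the columns into operand groups at blank columns, and fold over zip(operators, groups); Pre_ excludes malformed grids where A's compound stop condition ends its walk before or after the operator/group pairing is exhausted (and grids with non-digit cells, short rows or a blank operator row, where A raises).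
-- outside the precondition, e.g. on part_two([' ', '**']): A returns 1, B returns 2; on part_two([' ', '++']): A returns 0, B returns 0
import Mathlib
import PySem

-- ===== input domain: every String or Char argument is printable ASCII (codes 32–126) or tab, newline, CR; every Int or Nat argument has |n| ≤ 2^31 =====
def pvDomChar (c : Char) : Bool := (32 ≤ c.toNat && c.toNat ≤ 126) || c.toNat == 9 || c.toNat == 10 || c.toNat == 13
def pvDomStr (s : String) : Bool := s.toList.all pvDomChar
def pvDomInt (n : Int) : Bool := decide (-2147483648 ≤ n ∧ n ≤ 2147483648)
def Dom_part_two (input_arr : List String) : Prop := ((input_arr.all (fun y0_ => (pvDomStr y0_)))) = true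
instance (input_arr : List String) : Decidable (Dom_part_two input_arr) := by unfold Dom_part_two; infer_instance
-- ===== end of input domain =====

-- B replaces A's flag-driven dual-counter walk by a staged pipeline (operator list, digit
-- columns, groups split at blank columns, one fold over zip(operators, groups)); equal on Pre_.

-- ===== PORT A =====
-- int(s) for the 1-character strings both programs convert (0 on the ValueError path, which Pre_ excludes)
def pvCharInt (ch : Char) : Int := (PySem.Int.ofChars? [ch]).getD 0

-- inner `while input_arr[-1][operator_i] == ' '` scan; fuel makes it total (on the IndexError
-- path — no operator left — Python raises; the port just stops scanning, Pre_ excludes it)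
def pvOpScanA (last : List Char) : Nat → Nat → Nat
  | 0, oi => oi
  | fuel + 1, oi =>
    if PySem.List.pyGet? last (oi : Int) = some ' ' then pvOpScanA last fuel (oi + 1) else oi

-- the `for i in range(len(input_arr) - 1)` body: state (operand, digit_found)
def pvColA (rows : List (List Char)) (width c : Nat) : Int × Bool :=
  rows.foldl (fun acc row =>
    if width ≤ c then acc
    else match PySem.List.pyGet? row (c : Int) with
      | none => acc  -- IndexError path (Python raises; excluded by Pre_)
      | some ch => if ch = ' ' then acc else (pvCharInt ch + acc.1 * 10, true))
    (0, false)

-- the `while digit_found` loop; fuel width+2 is enough since operand_i grows each pass and a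
-- column at operand_i ≥ width is blank
def pvGroupA (rows : List (List Char)) (width : Nat) : Nat → Nat → List Int → List Int × Nat
  | 0, c, acc => (acc, c)
  | fuel + 1, c, acc =>
    let r := pvColA rows width c
    if r.2 then pvGroupA rows width fuel (c + 1) (acc ++ [r.1]) else (acc, c + 1)

-- the `# calculate` dispatch (also B's: the Python lines are identical in Source A and Source B)
def pvCalcA (op : Char) (operands : List Int) (total : Int) : Int :=
  if op = '+' then total + operands.sum
  else if op = '*' then total + operands.foldl (· * ·) 1
  else total

-- the `while is_calculating` loop; fuel len(last)+1 is enough since operand_i grows each pass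
-- and the loop continues only while operand_i < len(last)
def pvOuterA (rows : List (List Char)) (last : List Char) (width : Nat) :
    Nat → Nat → Nat → Int → Int
  | 0, _oi, _di, total => total
  | fuel + 1, oi, di, total =>
    let oi1 := pvOpScanA last (last.length + 1) oi
    let op := (PySem.List.pyGet? last (oi1 : Int)).getD ' '  -- getD: IndexError path, see pvOpScanA
    let g := pvGroupA rows width (width + 2) di []
    let total2 := pvCalcA op g.1 total
    if oi1 + 1 < width ∧ g.2 < last.length then pvOuterA rows last width fuel (oi1 + 1) g.2 total2
    else total2

def part_two (input_arr : List String) : Int :=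
  let chars := input_arr.map String.toList
  let last := (chars.getLast?).getD []     -- input_arr[-1]; [] = IndexError path, excluded by Pre_
  let width := ((chars.head?).getD []).length  -- len(input_arr[0])
  pvOuterA chars.dropLast last width (last.length + 1) 0 0 0

-- ===== PORT B =====
-- [int(r[c]) for r in rows if r[c] != ' ']  (one digit column of the grid)
def pvColVals (rows : List (List Char)) (c : Nat) : List Int :=
  rows.filterMap (fun r =>
    match PySem.List.pyGet? r (c : Int) with
    | none => none  -- IndexError path (Python B raises; excluded by Pre_)
    | some ch => if ch = ' ' then none else some (pvCharInt ch))

-- `val = 0; for d in col: val = val * 10 + d`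
def pvValOf (col : List Int) : Int := col.foldl (fun v d => v * 10 + d) 0

-- the `for col in columns` splitter: groups of column values, split at blank columns
def pvSplit (columns : List (List Int)) : List (List Int) :=
  let p := columns.foldl
    (fun (s : List (List Int) × List Int) col =>
      if col = [] then (s.1 ++ [s.2], [])
      else (s.1, s.2 ++ [pvValOf col]))
    ([], [])
  p.1 ++ [p.2]

def part_two_alt (input_arr : List String) : Int :=
  let chars := input_arr.map String.toList
  let op_row := (chars.getLast?).getD []   -- `*rows, op_row = input_arr`; [] = ValueError path, excluded by Pre_
  let rows := chars.dropLast
  let width := ((chars.head?).getD []).length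
  let operators := op_row.filter (fun ch => ch != ' ')
  let columns := (List.range width).map (fun c => pvColVals rows c)
  let groups := pvSplit columns
  (operators.zip groups).foldl (fun total og => pvCalcA og.1 og.2 total) 0

-- ===== PRECONDITION & SPEC =====
def pvDigits : List Char := ['0', '1', '2', '3', '4', '5', '6', '7', '8', '9']

def pvRowsOf (input_arr : List String) : List (List Char) := (input_arr.map String.toList).dropLast
def pvLastOf (input_arr : List String) : List Char := ((input_arr.map String.toList).getLast?).getD []
def pvWidthOf (input_arr : List String) : Nat := (((input_arr.map String.toList).head?).getD []).length
-- positions of the operators in the last row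
def pvPosList (l : List Char) : List Nat := ((l.zipIdx).filter (fun p => p.1 != ' ')).map (·.2)
-- the operand cursor's value after each group: one past each blank column, then width+1
def pvStops (rows : List (List Char)) (width : Nat) : List Nat :=
  (((List.range width).filter (fun c => rows.all (fun r => r.getD c ' ' == ' '))).map (· + 1))
    ++ [width + 1]
-- number of (operator, operand-group) pairs both programs pair up
def pvN (input_arr : List String) : Nat :=
  min (pvPosList (pvLastOf input_arr)).length
      (pvStops (pvRowsOf input_arr) (pvWidthOf input_arr)).length

-- Pre_ = where A returns AND its walk pairs operators with groups the way the grid reads: rows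
-- reach the grid width holding only digits/blanks there (A raises otherwise), at least one
-- operator exists (A raises otherwise), and A's compound stop condition fires exactly when the
-- operators or the groups run out — it also excludes the misaligned grids on which A still
-- returns, having stopped early or paired extra operators with accidental empty groups
-- (see claim.json cites): there A's value is an artefact of its two counters.
def Pre_part_two (input_arr : List String) : Prop :=
  1 ≤ input_arr.length ∧
  (∀ r ∈ pvRowsOf input_arr, pvWidthOf input_arr ≤ r.length ∧
      ∀ c < pvWidthOf input_arr, r.getD c ' ' = ' ' ∨ r.getD c ' ' ∈ pvDigits) ∧
  1 ≤ pvN input_arr ∧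
  (∀ k < pvN input_arr - 1,
      (pvPosList (pvLastOf input_arr)).getD k 0 + 1 < pvWidthOf input_arr ∧
      (pvStops (pvRowsOf input_arr) (pvWidthOf input_arr)).getD k 0 < (pvLastOf input_arr).length) ∧
  (pvWidthOf input_arr ≤ (pvPosList (pvLastOf input_arr)).getD (pvN input_arr - 1) 0 + 1 ∨
      (pvLastOf input_arr).length ≤
        (pvStops (pvRowsOf input_arr) (pvWidthOf input_arr)).getD (pvN input_arr - 1) 0)
instance (input_arr : List String) : Decidable (Pre_part_two input_arr) := by
  unfold Pre_part_two; infer_instance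

def pvWitness_part_two : List String := ["1 2", "3 4", "+ *"]

def Spec_part_two (input_arr : List String) (out : Int) : Prop := out = part_two_alt input_arr
instance (input_arr : List String) (out : Int) : Decidable (Spec_part_two input_arr out) := by
  unfold Spec_part_two; infer_instance

-- ===== CLAIM (what is proved, stated in full; the proofs are below) =====
def Claim_equal_part_two : Prop := ∀ (input_arr : List String), Dom_part_two input_arr →
  Pre_part_two input_arr → Spec_part_two input_arr (part_two input_arr)

-- ===== LEMMAS AND PROOFS =====

-- proof-side intermediate: A's walk re-expressed as a loop over the operator-position list
def pvColB (rows : List (List Char)) (c : Nat) : List Char :=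
  rows.filterMap (fun r =>
    match PySem.List.pyGet? r (c : Int) with
    | none => none
    | some ch => if ch = ' ' then none else some ch)

def pvToIntB (col : List Char) : Int :=
  col.foldl (fun val d => 10 * val + pvCharInt d) 0

def pvGroupB (rows : List (List Char)) (width : Nat) : Nat → Nat → List Int → List Int × Nat
  | 0, c, acc => (acc, c)
  | fuel + 1, c, acc =>
    if c < width then
      let col := pvColB rows c
      if col = [] then (acc, c + 1)
      else pvGroupB rows width fuel (c + 1) (acc ++ [pvToIntB col])
    else (acc, c + 1)

def pvLoopB (rows : List (List Char)) (op_row : List Char) (width : Nat) :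
    List Nat → Nat → Int → Int
  | [], _c, total => total
  | pos :: rest, c, total =>
    let g := pvGroupB rows width (width + 2) c []
    let op := (PySem.List.pyGet? op_row (pos : Int)).getD ' '
    let total2 := pvCalcA op g.1 total
    if width ≤ pos + 1 ∨ op_row.length ≤ g.2 then total2
    else pvLoopB rows op_row width rest g.2 total2

-- column read: A's flag-and-accumulator fold over the rows computes the filtered column list
theorem pvColA_foldl_eq (c : Nat) :
    ∀ (rows : List (List Char)) (v : Int) (f : Bool),
      rows.foldl (fun acc row =>
        match PySem.List.pyGet? row (c : Int) with
          | none => acc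
          | some ch => if ch = ' ' then acc else (pvCharInt ch + acc.1 * 10, true)) (v, f)
      = ((pvColB rows c).foldl (fun a ch => pvCharInt ch + a * 10) v,
         f || !(pvColB rows c).isEmpty) := by
  intro rows
  induction rows with
  | nil => intro v f; simp [pvColB]
  | cons row rows ih =>
    intro v f
    cases h : PySem.List.pyGet? row (c : Int) with
    | none => simp only [List.foldl_cons, h, pvColB, List.filterMap_cons]; exact ih v f
    | some ch =>
      by_cases hch : ch = ' '
      · simp only [List.foldl_cons, h, if_pos hch, pvColB, List.filterMap_cons]
        exact ih v f
      · simp only [List.foldl_cons, h, if_neg hch, pvColB, List.filterMap_cons]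
        rw [ih (pvCharInt ch + v * 10) true]
        simp [pvColB]

theorem pvColA_eq (rows : List (List Char)) (width c : Nat) (hc : c < width) :
    pvColA rows width c = (pvToIntB (pvColB rows c), !(pvColB rows c).isEmpty) := by
  have hunguard : ∀ (l : List (List Char)) (init : Int × Bool),
      l.foldl (fun acc row =>
        if width ≤ c then acc
        else match PySem.List.pyGet? row (c : Int) with
          | none => acc
          | some ch => if ch = ' ' then acc else (pvCharInt ch + acc.1 * 10, true)) init
      = l.foldl (fun acc row =>
        match PySem.List.pyGet? row (c : Int) with
          | none => acc
          | some ch => if ch = ' ' then acc else (pvCharInt ch + acc.1 * 10, true)) init := by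
    intro l
    induction l with
    | nil => intro init; rfl
    | cons row rest ih =>
      intro init
      rw [List.foldl_cons, List.foldl_cons, if_neg (by omega)]
      exact ih _
  unfold pvColA
  rw [hunguard rows (0, false), pvColA_foldl_eq c rows 0 false]
  have hfun : (fun (a : Int) (ch : Char) => pvCharInt ch + a * 10)
      = (fun (val : Int) (d : Char) => 10 * val + pvCharInt d) := by
    funext a d; ring
  rw [pvToIntB, hfun]
  simp

theorem pvColA_wide (rows : List (List Char)) (width c : Nat) (hc : width ≤ c) :
    pvColA rows width c = (0, false) := by
  unfold pvColA
  induction rows with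
  | nil => rfl
  | cons row rows ih => rw [List.foldl_cons, if_pos hc]; exact ih

-- the two group readers agree (same columns consumed, same operands, same final index)
theorem pvGroup_eq (rows : List (List Char)) (width : Nat) :
    ∀ (fuel c : Nat) (acc : List Int),
      pvGroupA rows width fuel c acc = pvGroupB rows width fuel c acc := by
  intro fuel
  induction fuel with
  | zero => intro c acc; rfl
  | succ fuel ih =>
    intro c acc
    by_cases hc : c < width
    · rw [pvGroupA, pvGroupB, if_pos hc, pvColA_eq rows width c hc]
      by_cases hcol : pvColB rows c = []
      · simp [hcol]
      · have hie : (!(pvColB rows c).isEmpty) = true := by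
          simpa [List.isEmpty_iff] using hcol
        rw [if_neg hcol, hie, if_pos rfl]
        exact ih (c + 1) (acc ++ [pvToIntB (pvColB rows c)])
    · rw [pvGroupA, pvGroupB, if_neg hc, pvColA_wide rows width c (by omega)]
      simp

-- the group reader always advances the column index
theorem pvGroupB_snd (rows : List (List Char)) (width : Nat) :
    ∀ (fuel c : Nat) (acc : List Int), 0 < fuel → width < fuel + c →
      c + 1 ≤ (pvGroupB rows width fuel c acc).2 := by
  intro fuel
  induction fuel with
  | zero => intro c acc h; omega
  | succ fuel ih =>
    intro c acc _ hfc
    rw [pvGroupB]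
    by_cases hc : c < width
    · rw [if_pos hc]
      by_cases hcol : pvColB rows c = []
      · simp [hcol]
      · rw [if_neg hcol]
        have := ih (c + 1) (acc ++ [pvToIntB (pvColB rows c)]) (by omega) (by omega)
        omega
    · rw [if_neg hc]

-- the operator positions of the tail of the row, starting at absolute index k
def pvPosAux : List Char → Nat → List Nat
  | [], _ => []
  | ch :: t, k => if ch = ' ' then pvPosAux t (k + 1) else k :: pvPosAux t (k + 1)

theorem pvPosAux_zipIdx : ∀ (l : List Char) (k : Nat),
    ((l.zipIdx k).filter (fun p => p.1 != ' ')).map (·.2) = pvPosAux l k := by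
  intro l
  induction l with
  | nil => intro k; rfl
  | cons ch t ih =>
    intro k
    rw [List.zipIdx_cons, pvPosAux]
    by_cases hch : ch = ' '
    · simp only [List.filter_cons, hch]
      simpa using ih (k + 1)
    · have hb : ((ch, k).1 != ' ') = true := by simpa using hch
      simp only [List.filter_cons, hb]
      rw [if_pos trivial, List.map_cons, if_neg hch]
      simpa using ih (k + 1)

theorem pvPosAux_nil_iff : ∀ (l : List Char) (k : Nat),
    pvPosAux l k = [] ↔ ∀ ch ∈ l, ch = ' ' := by
  intro l
  induction l with
  | nil => intro k; simp [pvPosAux]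
  | cons ch t ih =>
    intro k
    rw [pvPosAux]
    by_cases hch : ch = ' '
    · rw [if_pos hch, ih (k + 1)]
      simp [hch]
    · rw [if_neg hch]
      simp [hch]

theorem pvOpScanA_ge (last : List Char) : ∀ (fuel oi : Nat), oi ≤ pvOpScanA last fuel oi := by
  intro fuel
  induction fuel with
  | zero => intro oi; exact le_refl oi
  | succ fuel ih =>
    intro oi
    rw [pvOpScanA]
    split
    · exact le_trans (by omega) (ih (oi + 1))
    · exact le_refl oi

-- once the operator row holds only blanks from index oi on, A's outer loop adds nothing more
theorem pvOuterA_idle (rows : List (List Char)) (last : List Char) (width : Nat) :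
    ∀ (fuel oi di : Nat) (total : Int), (∀ ch ∈ last.drop oi, ch = ' ') →
      pvOuterA rows last width fuel oi di total = total := by
  intro fuel
  induction fuel with
  | zero => intro oi di total _; rfl
  | succ fuel ih =>
    intro oi di total hsp
    rw [pvOuterA]
    have hge := pvOpScanA_ge last (last.length + 1) oi
    have hop : (PySem.List.pyGet? last ((pvOpScanA last (last.length + 1) oi : Nat) : Int)).getD ' ' = ' ' := by
      cases h : PySem.List.pyGet? last ((pvOpScanA last (last.length + 1) oi : Nat) : Int) with
      | none => rfl
      | some ch =>
        rw [PySem.List.pyGet?_natCast] at h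
        have hmem : ch ∈ last.drop oi := by
          have h2 : (last.drop oi)[pvOpScanA last (last.length + 1) oi - oi]? = some ch := by
            rw [List.getElem?_drop]
            have : oi + (pvOpScanA last (last.length + 1) oi - oi)
                = pvOpScanA last (last.length + 1) oi := by omega
            rw [this]; exact h
          exact List.mem_of_getElem? h2
        simp [hsp ch hmem]
    rw [hop]
    have hcalc : pvCalcA ' ' (pvGroupA rows width (width + 2) di []).1 total = total := by
      rw [pvCalcA, if_neg (by decide), if_neg (by decide)]
    rw [hcalc]
    split
    · apply ih
      intro ch hch
      apply hsp
      have : last.drop (pvOpScanA last (last.length + 1) oi + 1)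
          = (last.drop oi).drop (pvOpScanA last (last.length + 1) oi + 1 - oi) := by
        rw [List.drop_drop]
        congr 1
        omega
      rw [this] at hch
      exact List.mem_of_mem_drop hch
    · rfl

-- the operator scan lands exactly on the first listed operator position
theorem pvOpScanA_finds (last : List Char) :
    ∀ (fuel oi p : Nat) (rest : List Nat), last.length < fuel + oi →
      pvPosAux (last.drop oi) oi = p :: rest →
      pvOpScanA last fuel oi = p ∧ rest = pvPosAux (last.drop (p + 1)) (p + 1) ∧ oi ≤ p := by
  intro fuel
  induction fuel with
  | zero =>
    intro oi p rest hf hpos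
    rw [List.drop_eq_nil_of_le (by omega)] at hpos
    exact absurd hpos (by simp [pvPosAux])
  | succ fuel ih =>
    intro oi p rest hf hpos
    by_cases hlt : oi < last.length
    · rw [List.drop_eq_getElem_cons hlt, pvPosAux] at hpos
      by_cases hch : last[oi] = ' '
      · rw [if_pos hch] at hpos
        have hrec := ih (oi + 1) p rest (by omega) hpos
        rw [pvOpScanA, if_pos (by rw [PySem.List.pyGet?_natCast, List.getElem?_eq_getElem hlt, hch])]
        exact ⟨hrec.1, hrec.2.1, by omega⟩
      · rw [if_neg hch] at hpos
        injection hpos with h1 h2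
        subst h1
        rw [pvOpScanA, if_neg (by
          rw [PySem.List.pyGet?_natCast, List.getElem?_eq_getElem hlt]
          simpa using hch)]
        exact ⟨rfl, h2.symm, le_refl oi⟩
    · rw [List.drop_eq_nil_of_le (by omega)] at hpos
      exact absurd hpos (by simp [pvPosAux])

-- A's dual-counter walk equals the position-list walk (unconditionally)
theorem pvMain_eq (rows : List (List Char)) (last : List Char) (width : Nat) :
    ∀ (fuel oi di : Nat) (total : Int),
      last.length + 1 ≤ fuel + di → di ≤ last.length →
      pvOuterA rows last width fuel oi di total
        = pvLoopB rows last width (pvPosAux (last.drop oi) oi) di total := by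
  intro fuel
  induction fuel with
  | zero => intro oi di total hf hd; omega
  | succ fuel ih =>
    intro oi di total hf hd
    cases hpos : pvPosAux (last.drop oi) oi with
    | nil =>
      rw [pvLoopB, pvOuterA_idle rows last width _ oi di total
        ((pvPosAux_nil_iff (last.drop oi) oi).mp hpos)]
    | cons p rest =>
      obtain ⟨hscan, hrest, hop⟩ :=
        pvOpScanA_finds last (last.length + 1) oi p rest (by omega) hpos
      rw [pvOuterA, pvLoopB, hscan, pvGroup_eq rows width]
      have hadv : di + 1 ≤ (pvGroupB rows width (width + 2) di []).2 :=
        pvGroupB_snd rows width (width + 2) di [] (by omega) (by omega)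
      by_cases hcont : p + 1 < width ∧ (pvGroupB rows width (width + 2) di []).2 < last.length
      · rw [if_pos hcont, if_neg (by omega)]
        rw [hrest]
        exact ih (p + 1) (pvGroupB rows width (width + 2) di []).2 _ (by omega) (by omega)
      · rw [if_neg hcont, if_pos (by omega)]

-- ===== pipeline machinery for B =====

-- the columns of the grid from index di on
def pvCols (rows : List (List Char)) (width di : Nat) : List (List Int) :=
  (List.range' di (width - di)).map (fun c => pvColVals rows c)

-- first group of a column list and the number of columns consumed (blank delimiter included)
def pvFirst : List (List Int) → List Int × Nat
  | [] => ([], 1)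
  | c :: t => if c = [] then ([], 1) else ((pvValOf c) :: (pvFirst t).1, (pvFirst t).2 + 1)

theorem pvFirst_pos (cs : List (List Int)) : 1 ≤ (pvFirst cs).2 := by
  cases cs with
  | nil => exact le_refl 1
  | cons c t =>
    rw [pvFirst]
    split
    · exact le_refl 1
    · omega

-- recursive form of the splitter
def pvSplitR : List (List Int) → List (List Int)
  | [] => [[]]
  | c :: t =>
    if c = [] then [] :: pvSplitR t
    else match pvSplitR t with
      | [] => [[pvValOf c]]
      | g :: gs => (pvValOf c :: g) :: gs

theorem pvSplitR_ne_nil (cs : List (List Int)) : pvSplitR cs ≠ [] := by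
  cases cs with
  | nil => simp [pvSplitR]
  | cons c t =>
    rw [pvSplitR]
    split
    · simp
    · split <;> simp

theorem pvSplitR_first (cs : List (List Int)) :
    pvSplitR cs = (pvFirst cs).1 ::
      (if (pvFirst cs).2 ≤ cs.length then pvSplitR (cs.drop (pvFirst cs).2) else []) := by
  induction cs with
  | nil => simp [pvSplitR, pvFirst]
  | cons c t ih =>
    by_cases hc : c = []
    · rw [pvSplitR, if_pos hc, pvFirst, if_pos hc]
      simp
    · rw [pvSplitR, if_neg hc, pvFirst, if_neg hc]
      rw [ih]
      have hcond : ((pvFirst t).2 + 1 ≤ (c :: t).length) = ((pvFirst t).2 ≤ t.length) := by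
        simp only [List.length_cons]
        exact propext (by omega)
      simp only [List.drop_succ_cons, hcond]

-- the foldl splitter equals the recursive one (accumulator generalization)
def pvConsHead (cur : List Int) : List (List Int) → List (List Int)
  | [] => [cur]
  | g :: gs => (cur ++ g) :: gs

theorem pvSplit_fold : ∀ (cs : List (List Int)) (done : List (List Int)) (cur : List Int),
    (let p := cs.foldl
        (fun (s : List (List Int) × List Int) col =>
          if col = [] then (s.1 ++ [s.2], []) else (s.1, s.2 ++ [pvValOf col]))
        (done, cur);
      p.1 ++ [p.2])
    = done ++ pvConsHead cur (pvSplitR cs) := by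
  intro cs
  induction cs with
  | nil => intro done cur; simp [pvSplitR, pvConsHead]
  | cons c t ih =>
    intro done cur
    by_cases hc : c = []
    · simp only [List.foldl_cons, if_pos hc]
      rw [ih (done ++ [cur]) []]
      rw [pvSplitR, if_pos hc]
      obtain ⟨g, gs, hg⟩ : ∃ g gs, pvSplitR t = g :: gs := by
        cases h : pvSplitR t with
        | nil => exact absurd h (pvSplitR_ne_nil t)
        | cons g gs => exact ⟨g, gs, rfl⟩
      rw [hg]
      simp [pvConsHead]
    · simp only [List.foldl_cons, if_neg hc]
      rw [ih done (cur ++ [pvValOf c])]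
      rw [pvSplitR, if_neg hc]
      cases h : pvSplitR t with
      | nil => exact absurd h (pvSplitR_ne_nil t)
      | cons g gs => simp [pvConsHead]

theorem pvSplit_eq (cs : List (List Int)) : pvSplit cs = pvSplitR cs := by
  rw [pvSplit]
  have := pvSplit_fold cs [] []
  simp only [List.nil_append] at this
  rw [this]
  cases h : pvSplitR cs with
  | nil => exact absurd h (pvSplitR_ne_nil cs)
  | cons g gs => simp [pvConsHead]

-- cursor positions after each group
def pvBnds (di : Nat) (cs : List (List Int)) : List Nat :=
  if _h : (pvFirst cs).2 ≤ cs.length then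
    (di + (pvFirst cs).2) :: pvBnds (di + (pvFirst cs).2) (cs.drop (pvFirst cs).2)
  else [di + (pvFirst cs).2]
termination_by cs.length
decreasing_by
  have h1 := pvFirst_pos cs
  simp only [List.length_drop]
  omega

theorem pvBnds_cons (di : Nat) (cs : List (List Int)) :
    pvBnds di cs = (di + (pvFirst cs).2) ::
      (if (pvFirst cs).2 ≤ cs.length then pvBnds (di + (pvFirst cs).2) (cs.drop (pvFirst cs).2)
       else []) := by
  rw [pvBnds]
  split <;> simp

theorem pvBnds_len (n : Nat) : ∀ (cs : List (List Int)), cs.length ≤ n → ∀ (di : Nat),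
    (pvBnds di cs).length = (pvSplitR cs).length := by
  induction n with
  | zero =>
    intro cs hcs di
    have : cs = [] := List.length_eq_zero_iff.mp (by omega)
    subst this
    rw [pvBnds_cons, pvSplitR]
    simp [pvFirst]
  | succ n ih =>
    intro cs hcs di
    rw [pvBnds_cons, pvSplitR_first cs]
    by_cases h : (pvFirst cs).2 ≤ cs.length
    · rw [if_pos h, if_pos h]
      simp only [List.length_cons]
      have h1 := pvFirst_pos cs
      rw [ih (cs.drop (pvFirst cs).2) (by simp [List.length_drop]; omega)]
    · rw [if_neg h, if_neg h]
      simp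

-- a non-blank head column shifts the boundaries by one
theorem pvBnds_cons_ne (di : Nat) (c : List Int) (t : List (List Int)) (hc : c ≠ []) :
    pvBnds di (c :: t) = pvBnds (di + 1) t := by
  have hfst : pvFirst (c :: t) = ((pvValOf c) :: (pvFirst t).1, (pvFirst t).2 + 1) := by
    rw [pvFirst, if_neg hc]
  rw [pvBnds_cons di (c :: t), pvBnds_cons (di + 1) t, hfst]
  simp only [List.length_cons, List.drop_succ_cons]
  have harith : di + ((pvFirst t).2 + 1) = di + 1 + (pvFirst t).2 := by omega
  rw [harith]
  congr 1
  by_cases hcd : (pvFirst t).2 ≤ t.length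
  · rw [if_pos (by omega), if_pos hcd]
  · rw [if_neg (by omega), if_neg hcd]

-- closed form of the boundary list over a range of columns
theorem pvBnds_range (rows : List (List Char)) : ∀ (w di : Nat),
    pvBnds di ((List.range' di w).map (fun c => pvColVals rows c))
      = (((List.range' di w).filter (fun c => decide (pvColVals rows c = []))).map (· + 1))
          ++ [di + w + 1] := by
  intro w
  induction w with
  | zero =>
    intro di
    rw [List.range'_zero]
    rw [pvBnds_cons]
    simp [pvFirst]
  | succ w ih =>
    intro di
    rw [List.range'_succ, List.map_cons, List.filter_cons]
    by_cases hc : pvColVals rows di = []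
    · have hfst : pvFirst (pvColVals rows di :: (List.range' (di + 1) w).map (fun c => pvColVals rows c))
          = ([], 1) := by rw [pvFirst, if_pos hc]
      rw [pvBnds_cons, hfst]
      simp only [List.length_cons, List.length_map, List.length_range']
      rw [if_pos (by omega)]
      simp only [List.drop_succ_cons, List.drop_zero]
      rw [ih (di + 1)]
      have : di + (w + 1) + 1 = di + 1 + w + 1 := by omega
      simp [hc, this]
    · rw [pvBnds_cons_ne di _ _ hc, ih (di + 1)]
      have : di + (w + 1) + 1 = di + 1 + w + 1 := by omega
      simp [hc, this]

-- under the shape hypothesis a column is empty exactly when its cells read blank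
theorem pvColEmpty_iff (rows : List (List Char)) (width c : Nat) (hc : c < width)
    (hshape : ∀ r ∈ rows, width ≤ r.length) :
    (pvColVals rows c = []) ↔ (rows.all (fun r => r.getD c ' ' == ' ') = true) := by
  rw [pvColVals, List.filterMap_eq_nil_iff, List.all_eq_true]
  constructor
  · intro h r hr
    have hcl : c < r.length := by have := hshape r hr; omega
    have := h r hr
    rw [PySem.List.pyGet?_natCast, List.getElem?_eq_getElem hcl] at this
    by_cases hsp : r[c] = ' '
    · simp [List.getD, List.getElem?_eq_getElem hcl, hsp]
    · simp [hsp] at this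
  · intro h r hr
    have hcl : c < r.length := by have := hshape r hr; omega
    have hgd := h r hr
    have hsp : r[c] = ' ' := by
      simpa [List.getD, List.getElem?_eq_getElem hcl] using hgd
    rw [PySem.List.pyGet?_natCast, List.getElem?_eq_getElem hcl, hsp]
    simp

-- Pre_'s closed-form boundary list is the pipeline's boundary list
theorem pvStops_eq (rows : List (List Char)) (width : Nat)
    (hshape : ∀ r ∈ rows, width ≤ r.length) :
    pvStops rows width = pvBnds 0 (pvCols rows width 0) := by
  rw [pvStops, pvCols]
  have hw : width - 0 = width := by omega
  rw [hw, pvBnds_range rows width 0, ← List.range_eq_range']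
  have hfilter : (List.range width).filter (fun c => decide (pvColVals rows c = []))
      = (List.range width).filter (fun c => rows.all (fun r => r.getD c ' ' == ' ')) := by
    apply List.filter_congr
    intro c hcmem
    have hc : c < width := List.mem_range.mp hcmem
    have hiff := pvColEmpty_iff rows width c hc hshape
    by_cases hball : rows.all (fun r => r.getD c ' ' == ' ') = true
    · rw [hball, decide_eq_true (hiff.mpr hball)]
    · rw [Bool.not_eq_true] at hball
      rw [hball, decide_eq_false (fun hcc => by
        rw [hiff.mp hcc] at hball
        exact absurd hball (by simp))]
  rw [hfilter]
  simp

-- the Int-valued column is the Char-valued column mapped through int()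
theorem pvColVals_map (rows : List (List Char)) (c : Nat) :
    pvColVals rows c = (pvColB rows c).map pvCharInt := by
  rw [pvColVals, pvColB]
  induction rows with
  | nil => rfl
  | cons r t ih =>
    simp only [List.filterMap_cons]
    cases h : PySem.List.pyGet? r (c : Int) with
    | none => exact ih
    | some ch =>
      by_cases hch : ch = ' '
      · simp only [if_pos hch]
        exact ih
      · simp only [if_neg hch, List.map_cons]
        rw [ih]

-- group reader computes the first group of the remaining columns
theorem pvGroupB_first (rows : List (List Char)) (width : Nat) :
    ∀ (fuel di : Nat) (acc : List Int), di ≤ width → width - di + 1 ≤ fuel →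
      pvGroupB rows width fuel di acc
        = (acc ++ (pvFirst (pvCols rows width di)).1, di + (pvFirst (pvCols rows width di)).2) := by
  intro fuel
  induction fuel with
  | zero => intro di acc _ hf; omega
  | succ fuel ih =>
    intro di acc hdi hf
    by_cases hc : di < width
    · have hcols : pvCols rows width di = pvColVals rows di :: pvCols rows width (di + 1) := by
        rw [pvCols, pvCols]
        have : width - di = (width - (di + 1)) + 1 := by omega
        rw [this, List.range'_succ]
        simp
      rw [pvGroupB, if_pos hc, hcols]
      by_cases hcol : pvColVals rows di = []
      · have hcolB : pvColB rows di = [] := by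
          have := pvColVals_map rows di
          rw [this] at hcol
          simpa using hcol
        rw [if_pos hcolB, pvFirst, if_pos hcol]
        simp
      · have hcolB : pvColB rows di ≠ [] := by
          intro hh
          apply hcol
          rw [pvColVals_map rows di, hh]
          rfl
        rw [if_neg hcolB, pvFirst, if_neg hcol]
        rw [ih (di + 1) (acc ++ [pvToIntB (pvColB rows di)]) (by omega) (by omega)]
        have hval : pvToIntB (pvColB rows di) = pvValOf (pvColVals rows di) := by
          rw [pvColVals_map rows di, pvValOf, List.foldl_map, pvToIntB]
          have : (fun (v : Int) (x : Char) => v * 10 + pvCharInt x)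
              = (fun (val : Int) (d : Char) => 10 * val + pvCharInt d) := by
            funext v x; ring
          rw [this]
        rw [hval]
        simp only [Prod.mk.injEq]
        exact ⟨by simp, by omega⟩
    · have hdieq : di = width := by omega
      have hcols : pvCols rows width di = [] := by
        rw [pvCols]
        have : width - di = 0 := by omega
        rw [this]
        simp
      rw [pvGroupB, if_neg hc, hcols, pvFirst]
      simp

theorem pvDrop_range' : ∀ (s n i : Nat), i ≤ n →
    (List.range' s n).drop i = List.range' (s + i) (n - i) := by
  intro s n i
  induction i generalizing s n with
  | zero => intro _; simp
  | succ i ih =>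
    intro h
    cases n with
    | zero => omega
    | succ n =>
      rw [List.range'_succ, List.drop_succ_cons, ih (s + 1) n (by omega)]
      congr 1 <;> omega

-- the position-list walk equals the zip fold of B's pipeline, given Pre_'s alignment conditions
theorem pvLoop_zip (rows : List (List Char)) (last : List Char) (width : Nat) :
    ∀ (ps : List Nat) (di : Nat) (total : Int), di ≤ width →
      1 ≤ min ps.length (pvSplitR (pvCols rows width di)).length →
      (∀ k, k + 1 < min ps.length (pvSplitR (pvCols rows width di)).length →
          ps.getD k 0 + 1 < width ∧ (pvBnds di (pvCols rows width di)).getD k 0 < last.length) →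
      (width ≤ ps.getD (min ps.length (pvSplitR (pvCols rows width di)).length - 1) 0 + 1 ∨
          last.length ≤ (pvBnds di (pvCols rows width di)).getD
            (min ps.length (pvSplitR (pvCols rows width di)).length - 1) 0) →
      pvLoopB rows last width ps di total
        = (ps.zip (pvSplitR (pvCols rows width di))).foldl
            (fun t pg => pvCalcA ((PySem.List.pyGet? last ((pg.1 : Nat) : Int)).getD ' ') pg.2 t)
            total := by
  intro ps
  induction ps with
  | nil => intro di total _ hn _ _; simp at hn
  | cons pos rest ih =>
    intro di total hdi hn hcont hstop
    have hgrp := pvGroupB_first rows width (width + 2) di [] hdi (by omega)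
    simp only [List.nil_append] at hgrp
    have hsplit := pvSplitR_first (pvCols rows width di)
    have hbnds := pvBnds_cons di (pvCols rows width di)
    have hlen_cs : (pvCols rows width di).length = width - di := by simp [pvCols]
    have hc01 := pvFirst_pos (pvCols rows width di)
    rw [pvLoopB, hgrp]
    by_cases hcle : (pvFirst (pvCols rows width di)).2 ≤ (pvCols rows width di).length
    · rw [if_pos hcle] at hsplit hbnds
      generalize hc0 : (pvFirst (pvCols rows width di)).2 = c0 at hsplit hbnds hcle hgrp hc01
      have hdrop : (pvCols rows width di).drop c0 = pvCols rows width (di + c0) := by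
        rw [pvCols, pvCols, ← List.map_drop, pvDrop_range' di (width - di) c0 (by omega)]
        congr 2
        omega
      rw [hdrop] at hsplit hbnds
      rw [hsplit] at hn hcont hstop ⊢
      rw [hbnds] at hcont hstop
      have hG'ne : (pvSplitR (pvCols rows width (di + c0))).length ≠ 0 := by
        simpa [List.length_eq_zero_iff] using pvSplitR_ne_nil (pvCols rows width (di + c0))
      simp only [List.length_cons] at hn hcont hstop
      by_cases hrest : rest = []
      · -- single pair: the stop condition fires now
        subst hrest
        have h0 : min (([] : List Nat).length + 1)
            ((pvSplitR (pvCols rows width (di + c0))).length + 1) = 1 := by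
          simp
        rw [h0] at hstop
        simp only [Nat.sub_self, List.getD_cons_zero] at hstop
        rw [if_pos hstop]
        simp [pvCalcA]
      · -- at least two pairs remain: the walk continues
        have hrlen : 1 ≤ rest.length := by
          cases rest with
          | nil => exact absurd rfl hrest
          | cons a b => simp
        have hmin : min (rest.length + 1)
            ((pvSplitR (pvCols rows width (di + c0))).length + 1)
            = min rest.length (pvSplitR (pvCols rows width (di + c0))).length + 1 := by
          omega
        rw [hmin] at hn hcont hstop
        set n' := min rest.length (pvSplitR (pvCols rows width (di + c0))).length with hn'
        have hn'1 : 1 ≤ n' := by omega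
        have hfirst := hcont 0 (by omega)
        simp only [List.getD_cons_zero] at hfirst
        rw [if_neg (by omega)]
        rw [List.zip_cons_cons, List.foldl_cons]
        have := ih (di + c0)
          (pvCalcA ((PySem.List.pyGet? last ((pos : Nat) : Int)).getD ' ')
            (pvFirst (pvCols rows width di)).1 total)
          (by omega) (by omega)
          (by
            intro k hk
            have := hcont (k + 1) (by omega)
            simpa only [List.getD_cons_succ] using this)
          (by
            have hidx : n' + 1 - 1 = (n' - 1) + 1 := by omega
            rw [hidx] at hstop
            simpa only [List.getD_cons_succ] using hstop)
        exact this
    · rw [if_neg hcle] at hsplit hbnds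
      rw [hsplit] at hn hcont hstop ⊢
      rw [hbnds] at hcont hstop
      simp only [List.length_cons, List.length_nil] at hn hcont hstop
      have h0 : min ((pos :: rest).length) (0 + 1) = 1 := by
        simp [List.length_cons]
      simp only [List.length_cons] at h0
      rw [h0] at hstop
      simp only [Nat.sub_self, List.getD_cons_zero] at hstop
      rw [if_pos hstop]
      simp [pvCalcA]

-- the filtered operator characters are the characters at the listed positions
theorem pvFilter_posmap (last : List Char) :
    ∀ (t : List Char) (k : Nat), t = last.drop k →
      t.filter (fun ch => ch != ' ')
        = (pvPosAux t k).map (fun p => (PySem.List.pyGet? last ((p : Nat) : Int)).getD ' ') := by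
  intro t
  induction t with
  | nil => intro k _; rfl
  | cons ch rest ih =>
    intro k hdrop
    have hk : k < last.length := by
      by_contra hh
      rw [List.drop_eq_nil_of_le (by omega)] at hdrop
      exact absurd hdrop.symm (by simp)
    have hch : last[k] = ch := by
      have := congrArg (fun l => l[0]?) hdrop.symm
      simp only [List.getElem?_drop, Nat.add_zero] at this
      rw [List.getElem?_eq_getElem hk] at this
      simpa using this
    have hrest : rest = last.drop (k + 1) := by
      have := congrArg List.tail hdrop
      simpa [List.tail_drop] using this
    rw [pvPosAux, List.filter_cons]
    by_cases hsp : ch = ' '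
    · rw [if_pos hsp]
      simp only [hsp, bne_self_eq_false, Bool.false_eq_true, if_false]
      exact ih (k + 1) hrest
    · rw [if_neg hsp]
      have hb : (ch != ' ') = true := by simpa using hsp
      rw [if_pos (by simp [hb])]
      rw [List.map_cons, ← ih (k + 1) hrest]
      congr 1
      rw [PySem.List.pyGet?_natCast, List.getElem?_eq_getElem hk, hch]
      rfl

-- ===== VERDICT (by name: the statement is the Claim_ definition above) =====
theorem part_two_spec : Claim_equal_part_two := by
  intro input_arr _hdom hpre
  obtain ⟨hlen, hshape, hn1, hcont, hstop⟩ := hpre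
  show part_two input_arr = part_two_alt input_arr
  have hA : part_two input_arr
      = pvOuterA (pvRowsOf input_arr) (pvLastOf input_arr) (pvWidthOf input_arr)
          ((pvLastOf input_arr).length + 1) 0 0 0 := rfl
  have hB : part_two_alt input_arr
      = ((((pvLastOf input_arr).filter (fun ch => ch != ' ')).zip
            (pvSplit ((List.range (pvWidthOf input_arr)).map
              (fun c => pvColVals (pvRowsOf input_arr) c)))).foldl
          (fun total og => pvCalcA og.1 og.2 total) 0) := rfl
  rw [hA, hB]
  rw [pvMain_eq (pvRowsOf input_arr) (pvLastOf input_arr) (pvWidthOf input_arr)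
      ((pvLastOf input_arr).length + 1) 0 0 0 (by omega) (by omega), List.drop_zero]
  have hP : pvPosList (pvLastOf input_arr) = pvPosAux (pvLastOf input_arr) 0 := by
    rw [pvPosList]
    exact pvPosAux_zipIdx (pvLastOf input_arr) 0
  have hshape' : ∀ r ∈ pvRowsOf input_arr, pvWidthOf input_arr ≤ r.length :=
    fun r hr => (hshape r hr).1
  have hstops : pvStops (pvRowsOf input_arr) (pvWidthOf input_arr)
      = pvBnds 0 (pvCols (pvRowsOf input_arr) (pvWidthOf input_arr) 0) :=
    pvStops_eq (pvRowsOf input_arr) (pvWidthOf input_arr) hshape'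
  have hcols0 : pvCols (pvRowsOf input_arr) (pvWidthOf input_arr) 0
      = (List.range (pvWidthOf input_arr)).map (fun c => pvColVals (pvRowsOf input_arr) c) := by
    rw [pvCols, Nat.sub_zero, ← List.range_eq_range']
  have hNlen : (pvStops (pvRowsOf input_arr) (pvWidthOf input_arr)).length
      = (pvSplitR (pvCols (pvRowsOf input_arr) (pvWidthOf input_arr) 0)).length := by
    rw [hstops]
    exact pvBnds_len (pvCols (pvRowsOf input_arr) (pvWidthOf input_arr) 0).length _ (le_refl _) 0
  have hNeq : pvN input_arr = min (pvPosAux (pvLastOf input_arr) 0).length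
      (pvSplitR (pvCols (pvRowsOf input_arr) (pvWidthOf input_arr) 0)).length := by
    rw [pvN, hP, hNlen]
  rw [hNeq] at hn1 hcont hstop
  rw [hP, hstops] at hcont hstop
  rw [pvLoop_zip (pvRowsOf input_arr) (pvLastOf input_arr) (pvWidthOf input_arr)
      (pvPosAux (pvLastOf input_arr) 0) 0 0 (by omega) hn1
      (by intro k hk; exact hcont k (by omega))
      hstop]
  rw [pvSplit_eq, ← hcols0]
  rw [pvFilter_posmap (pvLastOf input_arr) (pvLastOf input_arr) 0 (by rw [List.drop_zero])]
  rw [List.zip_map_left, List.foldl_map]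
  simp only [Prod.map_fst, Prod.map_snd, id]
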